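-- pv_equiv track=rewrite | github.com/ALC-Study-Unlimited/User-Portal | create_css_aliases.py | generate_alias_css
-- ===== SOURCE A (Python) =====
-- def generate_alias_css(alias_map):
--     """エイリアスCSSを生成"""
--     css_lines = [
--         "/* ================================= */",
--         "/* CSS Variable Aliases for Better Maintainability */",
--         "/* Generated to simplify long Webflow variable names */",
--         "/* Original values are preserved - these are just references */",
--         "/* ================================= */",
--         "",
--         ":root {"
--     ]
--
--     # カテゴリごとにグループ化
--     categories = {
--         'container': [],
--         'spacing': [],
--         'color': [],
--         'text': [],
--         'background': [],
--         'border': [],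
--         'button': [],
--         'card': [],
--         'input': [],
--         'typography': [],
--         'other': []
--     }
--
--     for long_name, short_name in sorted(alias_map.items(), key=lambda x: x[1]):
--         category = 'other'
--         short_clean = short_name.replace('--', '')
--
--         if 'container' in short_clean:
--             category = 'container'
--         elif 'spacing' in short_clean or 'padding' in short_clean or 'margin' in short_clean:
--             category = 'spacing'
--         elif 'color' in short_clean or 'neutral' in short_clean or 'accent' in short_clean:
--             category = 'color'
--         elif 'text' in short_clean or 'font' in short_clean:
--             category = 'text'
--         elif 'bg-' in short_clean or 'background' in short_clean:
--             category = 'background'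
--         elif 'border' in short_clean:
--             category = 'border'
--         elif 'button' in short_clean or 'btn' in short_clean:
--             category = 'button'
--         elif 'card' in short_clean:
--             category = 'card'
--         elif 'input' in short_clean:
--             category = 'input'
--         elif 'typography' in short_clean or 'heading' in short_clean:
--             category = 'typography'
--
--         categories[category].append((long_name, short_name))
--
--     # カテゴリごとに出力
--     for category, items in categories.items():
--         if items:
--             css_lines.append(f"  /* {category.title()} Variables */")
--             for long_name, short_name in items:
--                 css_lines.append(f"  {short_name}: var({long_name});")
--             css_lines.append("")
--
--     css_lines.append("}")
--     css_lines.append("")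
--
--     return '\n'.join(css_lines)
-- ===== SOURCE B (Python) =====
-- _CATEGORIES = ['container', 'spacing', 'color', 'text', 'background', 'border',
--                'button', 'card', 'input', 'typography', 'other']
--
--
-- def _rank(short_name):
--     """Category index of a short name, same substring precedence as before."""
--     s = short_name.replace('--', '')
--     if 'container' in s:
--         return 0
--     elif 'spacing' in s or 'padding' in s or 'margin' in s:
--         return 1
--     elif 'color' in s or 'neutral' in s or 'accent' in s:
--         return 2
--     elif 'text' in s or 'font' in s:
--         return 3
--     elif 'bg-' in s or 'background' in s:
--         return 4
--     elif 'border' in s: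
--         return 5
--     elif 'button' in s or 'btn' in s:
--         return 6
--     elif 'card' in s:
--         return 7
--     elif 'input' in s:
--         return 8
--     elif 'typography' in s or 'heading' in s:
--         return 9
--     return 10
--
--
-- def generate_alias_css(alias_map):
--     """エイリアスCSSを生成"""
--     header = [
--         "/* ================================= */",
--         "/* CSS Variable Aliases for Better Maintainability */",
--         "/* Generated to simplify long Webflow variable names */",
--         "/* Original values are preserved - these are just references */",
--         "/* ================================= */",
--         "",
--         ":root {"
--     ]
--     entries = sorted(alias_map.items(), key=lambda kv: kv[1])
--     lines = []
--     for r, name in enumerate(_CATEGORIES):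
--         group = [kv for kv in entries if _rank(kv[1]) == r]
--         if group:
--             lines.append(f"  /* {name.title()} Variables */")
--             lines.extend(f"  {short}: var({long});" for long, short in group)
--             lines.append("")
--     return '\n'.join(header + lines + ["}", ""])
-- ===== Notes on version B (the rewrite author's own statement) =====
-- stated objective: simpler
-- what changed: Replaces the dict-of-buckets accumulation and two-phase emit with an integer rank classifier and one filter pass per fixed category over the single sorted entry list, emitting each non-empty group directly.
import Mathlib
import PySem

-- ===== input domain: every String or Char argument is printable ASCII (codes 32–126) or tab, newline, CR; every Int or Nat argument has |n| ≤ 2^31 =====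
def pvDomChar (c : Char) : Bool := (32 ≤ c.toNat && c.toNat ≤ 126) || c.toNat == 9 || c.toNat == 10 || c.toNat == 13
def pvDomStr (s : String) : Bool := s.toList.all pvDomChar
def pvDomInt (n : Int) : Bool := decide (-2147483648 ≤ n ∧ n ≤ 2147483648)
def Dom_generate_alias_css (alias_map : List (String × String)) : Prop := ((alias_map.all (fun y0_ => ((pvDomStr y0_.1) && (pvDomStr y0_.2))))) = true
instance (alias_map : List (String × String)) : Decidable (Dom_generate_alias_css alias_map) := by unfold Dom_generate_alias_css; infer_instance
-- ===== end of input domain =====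

-- B replaces A's dict-of-buckets accumulation by a rank classifier plus one filter pass per
-- fixed category over the single sorted list (objective: simpler; return value only — no mutation).

-- shared faithful helpers, used by both sources: Python str.title(), exact on ASCII (a letter is
-- uppercased iff the previous character is not a letter), short_name.replace('--', ''), and the
-- fixed 7-line header literal that both sources contain verbatim
def pvTitleChars : Bool → List Char → List Char
  | _, [] => []
  | prevAlpha, c :: cs =>
      (if PySem.Chars.isalpha c then
        (if prevAlpha then PySem.Chars.lowerChar c else PySem.Chars.upperChar c)
       else c) :: pvTitleChars (PySem.Chars.isalpha c) cs

def pvTitle (s : String) : String := String.ofList (pvTitleChars false s.toList)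

def pvClean (s : String) : String := PySem.Str.replace s "--" ""

def pvHeader : List String :=
  ["/* ================================= */",
   "/* CSS Variable Aliases for Better Maintainability */",
   "/* Generated to simplify long Webflow variable names */",
   "/* Original values are preserved - these are just references */",
   "/* ================================= */",
   "",
   ":root {"]

-- ===== PORT A =====
-- A's elif chain assigning the category name (helper for readability; same chain, same order)
def catOfA (short : String) : String :=
  if PySem.Str.isIn "container" (pvClean short) then "container"
  else if PySem.Str.isIn "spacing" (pvClean short) || PySem.Str.isIn "padding" (pvClean short) || PySem.Str.isIn "margin" (pvClean short) then "spacing"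
  else if PySem.Str.isIn "color" (pvClean short) || PySem.Str.isIn "neutral" (pvClean short) || PySem.Str.isIn "accent" (pvClean short) then "color"
  else if PySem.Str.isIn "text" (pvClean short) || PySem.Str.isIn "font" (pvClean short) then "text"
  else if PySem.Str.isIn "bg-" (pvClean short) || PySem.Str.isIn "background" (pvClean short) then "background"
  else if PySem.Str.isIn "border" (pvClean short) then "border"
  else if PySem.Str.isIn "button" (pvClean short) || PySem.Str.isIn "btn" (pvClean short) then "button"
  else if PySem.Str.isIn "card" (pvClean short) then "card"
  else if PySem.Str.isIn "input" (pvClean short) then "input"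
  else if PySem.Str.isIn "typography" (pvClean short) || PySem.Str.isIn "heading" (pvClean short) then "typography"
  else "other"

-- the literal `categories = {...}` dict with its 11 empty buckets
def pvInitCats : PySem.Dict String (List (String × String)) :=
  PySem.Dict.ofList
    [("container", []), ("spacing", []), ("color", []), ("text", []), ("background", []),
     ("border", []), ("button", []), ("card", []), ("input", []), ("typography", []), ("other", [])]

def generate_alias_css (alias_map : List (String × String)) : String :=
  PySem.Str.join "\n"
    (((PySem.List.sorted (PySem.Dict.ofList alias_map).items (fun x => x.2) false).foldl
        (fun d p => d.modify (catOfA p.2) [] (fun l => l ++ [p])) pvInitCats).items.foldl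
      (fun acc ci =>
        if ci.2 ≠ [] then
          (ci.2.foldl (fun a p => a ++ ["  " ++ p.2 ++ ": var(" ++ p.1 ++ ");"])
            (acc ++ ["  /* " ++ pvTitle ci.1 ++ " Variables */"])) ++ [""]
        else acc)
      pvHeader
     ++ ["}", ""])

-- ===== PORT B =====
def pvCategories : List String :=
  ["container", "spacing", "color", "text", "background", "border", "button", "card", "input",
   "typography", "other"]

-- B's _rank: same substring chain, returning the category's index
def rankOfB (short : String) : Int :=
  if PySem.Str.isIn "container" (pvClean short) then 0
  else if PySem.Str.isIn "spacing" (pvClean short) || PySem.Str.isIn "padding" (pvClean short) || PySem.Str.isIn "margin" (pvClean short) then 1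
  else if PySem.Str.isIn "color" (pvClean short) || PySem.Str.isIn "neutral" (pvClean short) || PySem.Str.isIn "accent" (pvClean short) then 2
  else if PySem.Str.isIn "text" (pvClean short) || PySem.Str.isIn "font" (pvClean short) then 3
  else if PySem.Str.isIn "bg-" (pvClean short) || PySem.Str.isIn "background" (pvClean short) then 4
  else if PySem.Str.isIn "border" (pvClean short) then 5
  else if PySem.Str.isIn "button" (pvClean short) || PySem.Str.isIn "btn" (pvClean short) then 6
  else if PySem.Str.isIn "card" (pvClean short) then 7
  else if PySem.Str.isIn "input" (pvClean short) then 8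
  else if PySem.Str.isIn "typography" (pvClean short) || PySem.Str.isIn "heading" (pvClean short) then 9
  else 10

-- B's `entries = sorted(alias_map.items(), key=lambda kv: kv[1])`
def pvEntries (alias_map : List (String × String)) : List (String × String) :=
  PySem.List.sorted (PySem.Dict.ofList alias_map).items (fun x => x.2) false

def generate_alias_css_alt (alias_map : List (String × String)) : String :=
  PySem.Str.join "\n"
    (pvHeader ++
      (PySem.List.enumerate pvCategories 0).foldl
        (fun acc rn =>
          if (pvEntries alias_map).filter (fun kv => rankOfB kv.2 == rn.1) ≠ [] then
            acc ++ ["  /* " ++ pvTitle rn.2 ++ " Variables */"]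
                ++ ((pvEntries alias_map).filter (fun kv => rankOfB kv.2 == rn.1)).map
                    (fun kv => "  " ++ kv.2 ++ ": var(" ++ kv.1 ++ ");") ++ [""]
          else acc)
        []
      ++ ["}", ""])

-- ===== PRECONDITION & SPEC =====
def Spec_generate_alias_css (alias_map : List (String × String)) (out : String) : Prop := out = generate_alias_css_alt alias_map
instance (alias_map : List (String × String)) (out : String) : Decidable (Spec_generate_alias_css alias_map out) := by unfold Spec_generate_alias_css; infer_instance

-- ===== CLAIM (what is proved, stated in full; the proofs are below) =====
def Claim_equal_generate_alias_css : Prop := ∀ (alias_map : List (String × String)), Dom_generate_alias_css alias_map → Spec_generate_alias_css alias_map (generate_alias_css alias_map)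

-- ===== LEMMAS AND PROOFS =====

-- the category name at a given rank
def pvCatName : Int → String
  | 0 => "container" | 1 => "spacing" | 2 => "color" | 3 => "text" | 4 => "background"
  | 5 => "border" | 6 => "button" | 7 => "card" | 8 => "input" | 9 => "typography"
  | _ => "other"

set_option maxHeartbeats 1000000 in
lemma catOfA_eq_catName (s : String) : catOfA s = pvCatName (rankOfB s) := by
  simp only [catOfA, rankOfB]
  split_ifs <;> rfl

lemma rank_mem (s : String) : rankOfB s ∈ ([0,1,2,3,4,5,6,7,8,9,10] : List Int) := by
  unfold rankOfB
  split_ifs <;> simp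

lemma pred_eq (c : String) (i : Int)
    (h : ∀ r ∈ ([0,1,2,3,4,5,6,7,8,9,10] : List Int), (pvCatName r == c) = (r == i)) :
    (fun p : String × String => catOfA p.2 == c) = (fun p : String × String => rankOfB p.2 == i) := by
  funext p
  rw [catOfA_eq_catName]
  exact h _ (rank_mem p.2)

lemma catOfA_mem (s : String) : (pvCategories : PySem.Set String).contains (catOfA s) = true := by
  unfold catOfA pvCategories
  split_ifs <;> decide

lemma update_of_all_mem {α : Type} [BEq α] (s : PySem.Set α) (l : List α)
    (h : ∀ x ∈ l, s.contains x = true) : PySem.Set.update s l = s := by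
  induction l with
  | nil => rfl
  | cons x t ih =>
      have hx : List.contains s x = true := h x (by simp)
      have hstep : PySem.Set.update s (x :: t) = PySem.Set.update (PySem.Set.add s x) t := rfl
      have hadd : PySem.Set.add s x = s := by simp [PySem.Set.add, hx]
      rw [hstep, hadd]
      exact ih (fun y hy => h y (by simp [hy]))

set_option maxHeartbeats 1600000 in
lemma getD_init (c : String) : pvInitCats.getD c [] = [] := by
  have hmk : pvInitCats = PySem.Dict.mk
      [("container", []), ("spacing", []), ("color", []), ("text", []), ("background", []),
       ("border", []), ("button", []), ("card", []), ("input", []), ("typography", []), ("other", [])] := by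
    decide
  rw [hmk, PySem.Dict.getD_eq_get?_getD]
  simp only [PySem.Dict.get?_mk_cons]
  split_ifs <;> rfl

lemma getD_fold (l : List (String × String)) (d : PySem.Dict String (List (String × String)))
    (c : String) :
    (l.foldl (fun d p => d.modify (catOfA p.2) [] (fun l => l ++ [p])) d).getD c []
      = d.getD c [] ++ l.filter (fun p => catOfA p.2 == c) := by
  induction l generalizing d with
  | nil => simp
  | cons p t ih =>
      rw [List.foldl_cons, ih, PySem.Dict.getD_modify, List.filter_cons]
      by_cases h : catOfA p.2 = c
      · simp [h]
      · have h' : ¬ c = catOfA p.2 := fun hh => h hh.symm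
        simp [h, h']

lemma items_fold (l : List (String × String)) :
    (l.foldl (fun d p => d.modify (catOfA p.2) [] (fun l => l ++ [p])) pvInitCats).items
      = pvCategories.map (fun c => (c, l.filter (fun p => catOfA p.2 == c))) := by
  have hnd : (l.foldl (fun d p => d.modify (catOfA p.2) [] (fun l => l ++ [p])) pvInitCats).keys.Nodup :=
    PySem.Dict.nodup_keys_foldl_modify_key l (fun p => catOfA p.2) [] (fun _ p l => l ++ [p])
      pvInitCats (PySem.Dict.nodup_keys_ofList _)
  have hkeys : (l.foldl (fun d p => d.modify (catOfA p.2) [] (fun l => l ++ [p])) pvInitCats).keys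
      = pvCategories := by
    rw [PySem.Dict.keys_foldl_modify_key l (fun p => catOfA p.2) [] (fun _ p l => l ++ [p]) pvInitCats]
    have h0 : pvInitCats.keys = pvCategories := by decide
    rw [h0]
    exact update_of_all_mem _ _ (by
      intro x hx
      obtain ⟨p, _, rfl⟩ := List.mem_map.mp hx
      exact catOfA_mem p.2)
  rw [PySem.Dict.items_eq_map_keys _ hnd [], hkeys]
  refine List.map_congr_left ?_
  intro c _
  rw [getD_fold, getD_init, List.nil_append]

-- B's per-category output segment
def emitSeg (entries : List (String × String)) (i : Int) (name : String) : List String :=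
  if entries.filter (fun kv => rankOfB kv.2 == i) ≠ [] then
    ["  /* " ++ pvTitle name ++ " Variables */"]
      ++ (entries.filter (fun kv => rankOfB kv.2 == i)).map
          (fun kv => "  " ++ kv.2 ++ ": var(" ++ kv.1 ++ ");") ++ [""]
  else []

lemma foldA (l : List (String × List (String × String))) (acc : List String) :
    l.foldl
      (fun acc ci =>
        if ci.2 ≠ [] then
          (ci.2.foldl (fun a p => a ++ ["  " ++ p.2 ++ ": var(" ++ p.1 ++ ");"])
            (acc ++ ["  /* " ++ pvTitle ci.1 ++ " Variables */"])) ++ [""]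
        else acc) acc
    = acc ++ l.flatMap (fun ci =>
        if ci.2 ≠ [] then
          ["  /* " ++ pvTitle ci.1 ++ " Variables */"]
            ++ ci.2.map (fun p => "  " ++ p.2 ++ ": var(" ++ p.1 ++ ");") ++ [""]
        else []) := by
  induction l generalizing acc with
  | nil => simp
  | cons ci t ih =>
      rw [List.foldl_cons, ih, List.flatMap_cons]
      rw [PySem.List.foldl_append_singleton_eq_map]
      split_ifs <;> simp

lemma foldB (entries : List (String × String)) (l : List (Int × String)) (acc : List String) :
    l.foldl
      (fun acc rn =>
        if entries.filter (fun kv => rankOfB kv.2 == rn.1) ≠ [] then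
          acc ++ ["  /* " ++ pvTitle rn.2 ++ " Variables */"]
              ++ (entries.filter (fun kv => rankOfB kv.2 == rn.1)).map
                  (fun kv => "  " ++ kv.2 ++ ": var(" ++ kv.1 ++ ");") ++ [""]
        else acc) acc
    = acc ++ l.flatMap (fun rn => emitSeg entries rn.1 rn.2) := by
  induction l generalizing acc with
  | nil => simp
  | cons rn t ih =>
      rw [List.foldl_cons, ih, List.flatMap_cons]
      unfold emitSeg
      split_ifs <;> simp

lemma seg_eq (entries : List (String × String)) (c : String) (i : Int)
    (h : ∀ r ∈ ([0,1,2,3,4,5,6,7,8,9,10] : List Int), (pvCatName r == c) = (r == i)) :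
    (if entries.filter (fun p => catOfA p.2 == c) ≠ [] then
        ["  /* " ++ pvTitle c ++ " Variables */"]
          ++ (entries.filter (fun p => catOfA p.2 == c)).map
              (fun p => "  " ++ p.2 ++ ": var(" ++ p.1 ++ ");") ++ [""]
      else [])
    = emitSeg entries i c := by
  rw [pred_eq c i h]
  rfl

lemma main_eq (alias_map : List (String × String)) :
    generate_alias_css alias_map = generate_alias_css_alt alias_map := by
  unfold generate_alias_css generate_alias_css_alt pvEntries
  rw [items_fold, foldA, foldB]
  suffices h :
      (pvCategories.map (fun c =>
          (c, (PySem.List.sorted (PySem.Dict.ofList alias_map).items (fun x => x.2) false).filter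
            (fun p => catOfA p.2 == c)))).flatMap
        (fun ci =>
          if ci.2 ≠ [] then
            ["  /* " ++ pvTitle ci.1 ++ " Variables */"]
              ++ ci.2.map (fun p => "  " ++ p.2 ++ ": var(" ++ p.1 ++ ");") ++ [""]
          else [])
      = (PySem.List.enumerate pvCategories 0).flatMap
          (fun rn =>
            emitSeg (PySem.List.sorted (PySem.Dict.ofList alias_map).items (fun x => x.2) false)
              rn.1 rn.2) by
    rw [List.nil_append, h]
  rw [show PySem.List.enumerate pvCategories 0
      = [((0:Int), "container"), (1, "spacing"), (2, "color"), (3, "text"), (4, "background"),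
         (5, "border"), (6, "button"), (7, "card"), (8, "input"), (9, "typography"), (10, "other")]
      from by decide]
  rw [show pvCategories = ["container", "spacing", "color", "text", "background", "border",
      "button", "card", "input", "typography", "other"] from rfl]
  simp only [List.map_cons, List.map_nil, List.flatMap_cons, List.flatMap_nil]
  rw [seg_eq _ "container" 0 (by decide), seg_eq _ "spacing" 1 (by decide),
      seg_eq _ "color" 2 (by decide), seg_eq _ "text" 3 (by decide),
      seg_eq _ "background" 4 (by decide), seg_eq _ "border" 5 (by decide),
      seg_eq _ "button" 6 (by decide), seg_eq _ "card" 7 (by decide),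
      seg_eq _ "input" 8 (by decide), seg_eq _ "typography" 9 (by decide),
      seg_eq _ "other" 10 (by decide)]

-- ===== VERDICT (by name: the statement is the Claim_ definition above) =====
theorem generate_alias_css_spec : Claim_equal_generate_alias_css := by
  intro alias_map _
  unfold Spec_generate_alias_css
  exact main_eq alias_map
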